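-- pv_equiv track=rewrite | github.com/w4ester/Digital-Candle | candle/candle.py | format_dedication
-- ===== SOURCE A (Python) =====
-- def format_dedication(dedication):
--     """Format a dedication message for display.
--
--     Supports prefixes: 'memory', 'honor', 'thinking'
--     """
--     if not dedication:
--         return ""
--
--     prefixes = {
--         "memory": "In memory of",
--         "honor": "In honor of",
--         "thinking": "Thinking of",
--     }
--
--     # Check if dedication starts with a known prefix key
--     for key, prefix in prefixes.items():
--         if dedication.lower().startswith(key + ":"):
--             name = dedication[len(key) + 1:].strip()
--             return f"{prefix} {name}"
--
--     return dedication
-- ===== SOURCE B (Python) =====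
-- # B: a character-trie (DFA) matcher — one pass over the input, stopping at the
-- # first character that cannot extend a recognized colon-terminated prefix; no per-key scan,
-- # no whole-string lowercasing, no startswith.
-- _TRIE = {}
-- for _key, _prefix in (("memory", "In memory of"),
--                       ("honor", "In honor of"),
--                       ("thinking", "Thinking of")):
--     _node = _TRIE
--     for _ch in _key:
--         _node = _node.setdefault(_ch, {})
--     _node[":"] = _prefix
--
--
-- def format_dedication(dedication):
--     """Format a dedication message for display.
--
--     Supports prefixes: 'memory', 'honor', 'thinking'
--     """
--     if not dedication:
--         return ""
--     node = _TRIE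
--     for i, ch in enumerate(dedication):
--         val = node.get(ch.lower())
--         if val is None:
--             return dedication
--         if ch == ":":
--             return f"{val} {dedication[i + 1:].strip()}"
--         node = val
--     return dedication
-- ===== Notes on version B (the rewrite author's own statement) =====
-- stated objective: alternative
-- what changed: A scans the prefix table key by key, each time lowercasing the whole string and testing startswith then slicing by the key length; B builds a character trie (DFA) of the keys once and walks the input in a single pass, lowercasing one character at a time and stopping at the first character that cannot extend a recognized colon-terminated prefix.
import Mathlib
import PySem

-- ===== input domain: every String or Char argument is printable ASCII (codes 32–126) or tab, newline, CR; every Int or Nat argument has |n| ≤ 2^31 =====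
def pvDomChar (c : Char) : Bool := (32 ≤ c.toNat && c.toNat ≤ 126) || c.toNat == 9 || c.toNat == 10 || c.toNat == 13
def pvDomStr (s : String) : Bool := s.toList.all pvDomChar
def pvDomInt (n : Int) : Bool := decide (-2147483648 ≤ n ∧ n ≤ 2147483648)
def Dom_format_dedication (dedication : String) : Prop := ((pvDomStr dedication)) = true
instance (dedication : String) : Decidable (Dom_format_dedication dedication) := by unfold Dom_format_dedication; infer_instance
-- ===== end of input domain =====

-- B replaces A's per-key lower().startswith scan by a character trie (DFA) walked in one pass
-- over the input, stopping at the first character that cannot extend a recognized colon-terminated prefix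
-- (objective: alternative).

-- ===== PORT A =====
-- A's for-loop over the literal 3-entry dict is transliterated unrolled, one branch per (key, prefix) item in dict order.
def format_dedication (dedication : String) : String :=
  if dedication.toList = [] then ""
  else if PySem.Str.startswith (PySem.Str.lower dedication) "memory:" then
    "In memory of" ++ " " ++ PySem.Str.strip (PySem.Str.slice dedication (some 7) none)
  else if PySem.Str.startswith (PySem.Str.lower dedication) "honor:" then
    "In honor of" ++ " " ++ PySem.Str.strip (PySem.Str.slice dedication (some 6) none)
  else if PySem.Str.startswith (PySem.Str.lower dedication) "thinking:" then
    "Thinking of" ++ " " ++ PySem.Str.strip (PySem.Str.slice dedication (some 9) none)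
  else dedication

-- ===== PORT B =====
-- Source B's trie of nested dicts: a node's children map a char either to a sub-node or (for the
-- ':' edge) to the prefix string; a mutual pair instead of a nested inductive.
mutual
inductive BTrie
  | mk : BChildren → BTrie
inductive BChildren
  | nil : BChildren
  | consSub : Char → BTrie → BChildren → BChildren
  | consOut : Char → String → BChildren → BChildren
end

-- node.get(ch): first matching child, none = key absent
def cget : BChildren → Char → Option (BTrie ⊕ String)
  | .nil, _ => none
  | .consSub k t r, d => if k = d then some (.inl t) else cget r d
  | .consOut k s r, d => if k = d then some (.inr s) else cget r d

-- linear chain of nodes for one key ending in the ':' edge carrying the prefix string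
def chainT : List Char → String → BTrie
  | [], pre => .mk (.consOut ':' pre .nil)
  | c :: cs, pre => .mk (.consSub c (chainT cs pre) .nil)

-- the evaluated module-level _TRIE: the three keys share no prefix, so each hangs off the
-- root as a linear chain
def bTrie : BTrie :=
  .mk (.consSub 'm' (chainT "emory".toList "In memory of")
      (.consSub 'h' (chainT "onor".toList "In honor of")
      (.consSub 't' (chainT "hinking".toList "Thinking of") .nil)))

-- Source B's enumerate loop: walk the trie over the characters, i tracks the Python index
def bwalk (ded : String) : List Char → Int → BTrie → String
  | [], _, _ => ded
  | c :: cs, i, .mk ch =>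
    match cget ch (PySem.Chars.lowerChar c) with
    | none => ded
    | some (.inr pre) =>
      if c = ':' then pre ++ " " ++ PySem.Str.strip (PySem.Str.slice ded (some (i + 1)) none)
      else ded  -- unreachable: only the ':' edge carries a string
    | some (.inl t) =>
      if c = ':' then ded  -- unreachable: ':' edges never carry a subtree
      else bwalk ded cs (i + 1) t

def format_dedication_alt (dedication : String) : String :=
  if dedication.toList = [] then "" else bwalk dedication dedication.toList 0 bTrie

-- ===== PRECONDITION & SPEC =====
def Spec_format_dedication (dedication : String) (out : String) : Prop := out = format_dedication_alt dedication
instance (dedication : String) (out : String) : Decidable (Spec_format_dedication dedication out) := by unfold Spec_format_dedication; infer_instance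

-- ===== CLAIM (what is proved, stated in full; the proofs are below) =====
def Claim_equal_format_dedication : Prop := ∀ (dedication : String), Dom_format_dedication dedication → Spec_format_dedication dedication (format_dedication dedication)

-- ===== LEMMAS AND PROOFS =====

theorem lowerChar_eq_colon_iff (c : Char) : PySem.Chars.lowerChar c = ':' ↔ c = ':' := by
  unfold PySem.Chars.lowerChar PySem.Chars.isupper
  split_ifs with h
  · simp only [Bool.and_eq_true, decide_eq_true_eq] at h
    have h1 : 65 ≤ c.toNat := by
      have := h.1; simp only [Char.le_def, UInt32.le_iff_toNat_le] at this; exact this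
    have h2 : c.toNat ≤ 90 := by
      have := h.2; simp only [Char.le_def, UInt32.le_iff_toNat_le] at this; exact this
    constructor
    · intro hc
      exfalso
      have hv : (c.toNat + 32).isValidChar := Or.inl (by omega)
      have ht : (Char.ofNat (c.toNat + 32)).toNat = c.toNat + 32 := by
        rw [Char.ofNat, dif_pos hv]
        exact Char.toNat_ofNatAux hv
      have h58 : (Char.ofNat (c.toNat + 32)).toNat = (':' : Char).toNat := congrArg Char.toNat hc
      rw [ht] at h58
      have : ((':' : Char)).toNat = 58 := rfl
      omega
    · intro hc
      exfalso
      subst hc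
      have : ((':' : Char)).toNat = 58 := rfl
      omega
  · exact Iff.rfl

-- walking a linear chain for key (no ':' inside) from position i is exactly A's
-- lowercased startswith test on key++":" with A's length-based slice
set_option maxRecDepth 4096 in
theorem bwalk_chainT (ded pre : String) (key : List Char) (hk : ':' ∉ key) :
    ∀ (l : List Char) (i : Int),
      bwalk ded l i (chainT key pre) =
        if PySem.Chars.startswith (PySem.Chars.lower l) (key ++ [':']) = true
        then pre ++ " " ++ PySem.Str.strip (PySem.Str.slice ded (some (i + key.length + 1)) none)
        else ded := by
  induction key with
  | nil =>
    intro l i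
    cases l with
    | nil => simp [bwalk, PySem.Chars.lower, PySem.Chars.startswith]
    | cons c cs =>
      by_cases hc : c = ':'
      · subst hc
        have hlc : PySem.Chars.lowerChar ':' = ':' := by decide
        simp only [bwalk, chainT, cget, hlc]
        simp [PySem.Chars.lower, PySem.Chars.startswith, hlc]
      · have hlc : ¬ (':' = PySem.Chars.lowerChar c) :=
          fun h => hc ((lowerChar_eq_colon_iff c).mp h.symm)
        simp [bwalk, chainT, cget, hlc, PySem.Chars.lower, PySem.Chars.startswith,
          List.isPrefixOf_iff_prefix, List.cons_prefix_cons]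
  | cons k ks ih =>
    have hkk : ¬ (k = ':') := fun h => hk (h ▸ List.mem_cons_self)
    have hks : ':' ∉ ks := fun h => hk (List.mem_cons_of_mem _ h)
    intro l i
    cases l with
    | nil => simp [bwalk, PySem.Chars.lower, PySem.Chars.startswith]
    | cons c cs =>
      by_cases hm : k = PySem.Chars.lowerChar c
      · have hcne : ¬ (c = ':') := by
          intro h; subst h
          exact hkk (by rw [hm]; decide)
        have hrec := ih hks cs (i + 1)
        simp only [bwalk, chainT, cget, if_pos hm, if_neg hcne]
        rw [hrec]
        have harith : (i + 1) + (ks.length : Int) + 1 = i + ((ks.length + 1 : Nat) : Int) + 1 := by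
          push_cast; ring
        simp only [PySem.Chars.lower, List.map_cons, PySem.Chars.startswith,
          List.isPrefixOf_iff_prefix, List.cons_append, List.cons_prefix_cons,
          List.length_cons, hm, true_and, harith]
      · simp [bwalk, chainT, cget, hm, PySem.Chars.lower, PySem.Chars.startswith,
          List.isPrefixOf_iff_prefix, List.cons_prefix_cons]

theorem format_dedication_spec_aux (dedication : String) :
    format_dedication dedication = format_dedication_alt dedication := by
  unfold format_dedication format_dedication_alt
  cases hL : dedication.toList with
  | nil => simp
  | cons c cs =>
    rw [if_neg (List.cons_ne_nil c cs), if_neg (List.cons_ne_nil c cs)]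
    have hsw : ∀ (p : String), PySem.Str.startswith (PySem.Str.lower dedication) p =
        PySem.Chars.startswith (PySem.Chars.lower (c :: cs)) p.toList := by
      intro p
      rw [PySem.Str.startswith_eq, PySem.Str.toList_lower, hL]
    have hcons : ∀ (k : Char) (rest : List Char),
        PySem.Chars.startswith (PySem.Chars.lower (c :: cs)) (k :: rest) = true ↔
          (k = PySem.Chars.lowerChar c ∧
            PySem.Chars.startswith (PySem.Chars.lower cs) rest = true) := by
      intro k rest
      simp only [PySem.Chars.lower, List.map_cons, PySem.Chars.startswith,
        List.isPrefixOf_iff_prefix, List.cons_prefix_cons]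
    by_cases hm : 'm' = PySem.Chars.lowerChar c
    · have hcne : ¬ (c = ':') := by
        intro h; subst h; exact absurd hm (by decide)
      have hstepB : bwalk dedication (c :: cs) 0 bTrie =
          bwalk dedication cs 1 (chainT "emory".toList "In memory of") := by
        simp only [bwalk, bTrie, cget]
        rw [if_pos hm]
        simp [hcne]
      rw [hstepB, bwalk_chainT dedication "In memory of" "emory".toList (by decide) cs 1]
      have hmem : PySem.Str.startswith (PySem.Str.lower dedication) "memory:" =
          PySem.Chars.startswith (PySem.Chars.lower cs) ("emory".toList ++ [':']) := by
        rw [hsw]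
        have : ("memory:" : String).toList = 'm' :: ("emory".toList ++ [':']) := by decide
        rw [this]
        by_cases h : PySem.Chars.startswith (PySem.Chars.lower cs) ("emory".toList ++ [':']) = true
        · rw [h, (hcons 'm' _).mpr ⟨hm, h⟩]
        · rcases Bool.eq_false_iff.mpr h with h'
          rw [Bool.eq_false_iff.mpr (fun hc => h ((hcons 'm' _).mp hc).2), h']
      have hhon : ¬ (PySem.Str.startswith (PySem.Str.lower dedication) "honor:" = true) := by
        rw [hsw]
        intro hh
        have : ("honor:" : String).toList = 'h' :: ("onor".toList ++ [':']) := by decide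
        rw [this] at hh
        exact absurd (((hcons _ _).mp hh).1.trans hm.symm) (by decide)
      have hthk : ¬ (PySem.Str.startswith (PySem.Str.lower dedication) "thinking:" = true) := by
        rw [hsw]
        intro hh
        have : ("thinking:" : String).toList = 't' :: ("hinking".toList ++ [':']) := by decide
        rw [this] at hh
        exact absurd (((hcons _ _).mp hh).1.trans hm.symm) (by decide)
      rw [hmem]
      by_cases h : PySem.Chars.startswith (PySem.Chars.lower cs) ("emory".toList ++ [':']) = true
      · rw [if_pos h, if_pos h]
        rw [show (1 + (("emory":String).toList.length : Int) + 1) = 7 by decide]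
      · rw [if_neg h, if_neg h, if_neg hhon, if_neg hthk]
    · by_cases hh : 'h' = PySem.Chars.lowerChar c
      · have hcne : ¬ (c = ':') := by
          intro h; subst h; exact absurd hh (by decide)
        have hstepB : bwalk dedication (c :: cs) 0 bTrie =
            bwalk dedication cs 1 (chainT "onor".toList "In honor of") := by
          simp only [bwalk, bTrie, cget]
          rw [if_neg hm, if_pos hh]
          simp [hcne]
        rw [hstepB, bwalk_chainT dedication "In honor of" "onor".toList (by decide) cs 1]
        have hmemN : ¬ (PySem.Str.startswith (PySem.Str.lower dedication) "memory:" = true) := by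
          rw [hsw]
          intro hx
          have : ("memory:" : String).toList = 'm' :: ("emory".toList ++ [':']) := by decide
          rw [this] at hx
          exact hm ((hcons _ _).mp hx).1
        have hhonE : PySem.Str.startswith (PySem.Str.lower dedication) "honor:" =
            PySem.Chars.startswith (PySem.Chars.lower cs) ("onor".toList ++ [':']) := by
          rw [hsw]
          have : ("honor:" : String).toList = 'h' :: ("onor".toList ++ [':']) := by decide
          rw [this]
          by_cases h : PySem.Chars.startswith (PySem.Chars.lower cs) ("onor".toList ++ [':']) = true
          · rw [h, (hcons 'h' _).mpr ⟨hh, h⟩]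
          · rw [Bool.eq_false_iff.mpr (fun hc => h ((hcons 'h' _).mp hc).2),
              Bool.eq_false_iff.mpr h]
        have hthk : ¬ (PySem.Str.startswith (PySem.Str.lower dedication) "thinking:" = true) := by
          rw [hsw]
          intro hx
          have : ("thinking:" : String).toList = 't' :: ("hinking".toList ++ [':']) := by decide
          rw [this] at hx
          exact absurd (((hcons _ _).mp hx).1.trans hh.symm) (by decide)
        rw [if_neg hmemN, hhonE]
        by_cases h : PySem.Chars.startswith (PySem.Chars.lower cs) ("onor".toList ++ [':']) = true
        · rw [if_pos h, if_pos h]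
          rw [show (1 + (("onor":String).toList.length : Int) + 1) = 6 by decide]
        · rw [if_neg h, if_neg h, if_neg hthk]
      · by_cases ht : 't' = PySem.Chars.lowerChar c
        · have hcne : ¬ (c = ':') := by
            intro h; subst h; exact absurd ht (by decide)
          have hstepB : bwalk dedication (c :: cs) 0 bTrie =
              bwalk dedication cs 1 (chainT "hinking".toList "Thinking of") := by
            simp only [bwalk, bTrie, cget]
            rw [if_neg hm, if_neg hh, if_pos ht]
            simp [hcne]
          rw [hstepB, bwalk_chainT dedication "Thinking of" "hinking".toList (by decide) cs 1]
          have hmemN : ¬ (PySem.Str.startswith (PySem.Str.lower dedication) "memory:" = true) := by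
            rw [hsw]
            intro hx
            have : ("memory:" : String).toList = 'm' :: ("emory".toList ++ [':']) := by decide
            rw [this] at hx
            exact hm ((hcons _ _).mp hx).1
          have hhonN : ¬ (PySem.Str.startswith (PySem.Str.lower dedication) "honor:" = true) := by
            rw [hsw]
            intro hx
            have : ("honor:" : String).toList = 'h' :: ("onor".toList ++ [':']) := by decide
            rw [this] at hx
            exact hh ((hcons _ _).mp hx).1
          have hthkE : PySem.Str.startswith (PySem.Str.lower dedication) "thinking:" =
              PySem.Chars.startswith (PySem.Chars.lower cs) ("hinking".toList ++ [':']) := by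
            rw [hsw]
            have : ("thinking:" : String).toList = 't' :: ("hinking".toList ++ [':']) := by decide
            rw [this]
            by_cases h : PySem.Chars.startswith (PySem.Chars.lower cs) ("hinking".toList ++ [':']) = true
            · rw [h, (hcons 't' _).mpr ⟨ht, h⟩]
            · rw [Bool.eq_false_iff.mpr (fun hc => h ((hcons 't' _).mp hc).2),
                Bool.eq_false_iff.mpr h]
          rw [if_neg hmemN, if_neg hhonN, hthkE]
          by_cases h : PySem.Chars.startswith (PySem.Chars.lower cs) ("hinking".toList ++ [':']) = true
          · rw [if_pos h, if_pos h]
            rw [show (1 + (("hinking":String).toList.length : Int) + 1) = 9 by decide]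
          · rw [if_neg h, if_neg h]
        · -- no root edge: B returns the input; all three of A's tests fail on the first char
          have hstepB : bwalk dedication (c :: cs) 0 bTrie = dedication := by
            simp only [bwalk, bTrie, cget]
            rw [if_neg hm, if_neg hh, if_neg ht]
          rw [hstepB]
          have hmemN : ¬ (PySem.Str.startswith (PySem.Str.lower dedication) "memory:" = true) := by
            rw [hsw]
            intro hx
            have : ("memory:" : String).toList = 'm' :: ("emory".toList ++ [':']) := by decide
            rw [this] at hx
            exact hm ((hcons _ _).mp hx).1
          have hhonN : ¬ (PySem.Str.startswith (PySem.Str.lower dedication) "honor:" = true) := by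
            rw [hsw]
            intro hx
            have : ("honor:" : String).toList = 'h' :: ("onor".toList ++ [':']) := by decide
            rw [this] at hx
            exact hh ((hcons _ _).mp hx).1
          have hthkN : ¬ (PySem.Str.startswith (PySem.Str.lower dedication) "thinking:" = true) := by
            rw [hsw]
            intro hx
            have : ("thinking:" : String).toList = 't' :: ("hinking".toList ++ [':']) := by decide
            rw [this] at hx
            exact ht ((hcons _ _).mp hx).1
          rw [if_neg hmemN, if_neg hhonN, if_neg hthkN]

-- ===== VERDICT (by name: the statement is the Claim_ definition above) =====
theorem format_dedication_spec : Claim_equal_format_dedication := by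
  intro dedication _
  exact format_dedication_spec_aux dedication
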